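-- pv_equiv track=rewrite | github.com/po4yka/bite-size-reader | app/core/summary_schema.py | _hash_tagify
-- ===== SOURCE A (Python) =====
-- def _hash_tagify(tags: list[str], max_tags: int = 10) -> list[str]:
--     """Deduplicate tags, enforce ``#`` prefix, and cap count."""
--     if not isinstance(tags, list):
--         return []
--     if not isinstance(max_tags, int) or max_tags <= 0 or max_tags > 100:
--         max_tags = 10
--     seen: set[str] = set()
--     result: list[str] = []
--     for t in tags:
--         if not isinstance(t, str):
--             continue
--         t = t.strip()
--         if not t:
--             continue
--         if len(t) > 100:
--             continue
--         if any(char in t.lower() for char in ["<", ">", "script", "javascript"]):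
--             continue
--         if not t.startswith("#"):
--             t = f"#{t}"
--         key = t.lower()
--         if key not in seen:
--             seen.add(key)
--             result.append(t)
--         if len(result) >= max_tags:
--             break
--     return result
-- ===== SOURCE B (Python) =====
-- def _hash_tagify(tags: list[str], max_tags: int = 10) -> list[str]:
--     """Deduplicate tags, enforce ``#`` prefix, and cap count.
--
--     Three sequential passes: clean, dedup by lowercase key, cap.
--     """
--     if not isinstance(tags, list):
--         return []
--     if not isinstance(max_tags, int) or max_tags <= 0 or max_tags > 100:
--         max_tags = 10
--     cleaned = []
--     for t in tags:
--         if not isinstance(t, str):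
--             continue
--         t = t.strip()
--         if not t or len(t) > 100:
--             continue
--         low = t.lower()
--         if any(bad in low for bad in ("<", ">", "script", "javascript")):
--             continue
--         cleaned.append(t if t.startswith("#") else "#" + t)
--     seen = set()
--     deduped = []
--     for t in cleaned:
--         key = t.lower()
--         if key not in seen:
--             seen.add(key)
--             deduped.append(t)
--     return deduped[:max_tags]
-- ===== Notes on version B (the rewrite author's own statement) =====
-- stated objective: alternative
-- what changed: Replaces A's single fused loop with early break by a three-pass pipeline: a cleaning pass (strip, length/forbidden-substring filter, '#' prefix), an order-preserving dedup pass keyed by lowercase, and a final slice to max_tags.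
import Mathlib
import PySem

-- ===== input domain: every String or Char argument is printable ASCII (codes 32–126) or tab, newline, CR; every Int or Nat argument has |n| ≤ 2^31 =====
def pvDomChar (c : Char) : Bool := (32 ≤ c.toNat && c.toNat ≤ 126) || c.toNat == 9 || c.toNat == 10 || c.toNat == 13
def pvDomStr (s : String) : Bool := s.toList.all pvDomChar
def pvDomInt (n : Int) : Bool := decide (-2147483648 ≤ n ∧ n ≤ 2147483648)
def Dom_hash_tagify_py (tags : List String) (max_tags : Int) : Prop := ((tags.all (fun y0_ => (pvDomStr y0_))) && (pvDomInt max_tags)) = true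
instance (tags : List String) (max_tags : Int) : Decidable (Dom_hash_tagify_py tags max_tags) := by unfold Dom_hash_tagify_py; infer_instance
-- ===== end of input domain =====

-- B replaces A's fused loop (filter + dedup + early break) with three sequential passes:
-- clean, dedup by lowercase key, slice to max_tags; same return value, proved below.

-- ===== PORT A =====
-- A's single loop: filter/normalize each tag, dedup by lowercase key, break once
-- the result reaches max_tags.
def hashTagifyLoopA (ts : List String) (seen : PySem.Set String)
    (result : List String) (mt : Int) : List String :=
  match ts with
  | [] => result
  | t :: rest =>
    let t := PySem.Str.strip t
    if t = "" then hashTagifyLoopA rest seen result mt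
    else if PySem.Str.len t > 100 then hashTagifyLoopA rest seen result mt
    else if ["<", ">", "script", "javascript"].any
        (fun c => PySem.Str.isIn c (PySem.Str.lower t)) then
      hashTagifyLoopA rest seen result mt
    else
      let t := if PySem.Str.startswith t "#" then t else "#" ++ t
      let key := PySem.Str.lower t
      let p := if PySem.Set.contains seen key then (seen, result)
               else (PySem.Set.add seen key, result ++ [t])
      if ((p.2.length : Int) ≥ mt) then p.2
      else hashTagifyLoopA rest p.1 p.2 mt

def hash_tagify_py (tags : List String) (max_tags : Int) : List String :=
  let mt := if max_tags ≤ 0 ∨ max_tags > 100 then 10 else max_tags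
  hashTagifyLoopA tags PySem.Set.empty [] mt

-- ===== PORT B =====
-- pass 1 body: clean one tag (strip, drop empty/too-long/forbidden, add '#').
def pvCleanTag (t : String) : Option String :=
  let t := PySem.Str.strip t
  if t = "" ∨ PySem.Str.len t > 100 then none
  else
    let low := PySem.Str.lower t
    if [("<" : String), ">", "script", "javascript"].any
        (fun bad => PySem.Str.isIn bad low) then none
    else some (if PySem.Str.startswith t "#" then t else "#" ++ t)

-- pass 2: order-preserving dedup by lowercase key with a seen set.
def pvDedupLower (ts : List String) (seen : PySem.Set String) : List String :=
  match ts with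
  | [] => []
  | t :: rest =>
    let key := PySem.Str.lower t
    if PySem.Set.contains seen key then pvDedupLower rest seen
    else t :: pvDedupLower rest (PySem.Set.add seen key)

def hash_tagify_py_alt (tags : List String) (max_tags : Int) : List String :=
  let mt := if max_tags ≤ 0 ∨ max_tags > 100 then 10 else max_tags
  PySem.List.slice (pvDedupLower (tags.filterMap pvCleanTag) PySem.Set.empty)
    none (some mt)

-- ===== PRECONDITION & SPEC =====
def Spec_hash_tagify_py (tags : List String) (max_tags : Int) (out : List String) : Prop := out = hash_tagify_py_alt tags max_tags
instance (tags : List String) (max_tags : Int) (out : List String) : Decidable (Spec_hash_tagify_py tags max_tags out) := by unfold Spec_hash_tagify_py; infer_instance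

-- ===== CLAIM (what is proved, stated in full; the proofs are below) =====
def Claim_equal_hash_tagify_py : Prop := ∀ (tags : List String) (max_tags : Int), Dom_hash_tagify_py tags max_tags → Spec_hash_tagify_py tags max_tags (hash_tagify_py tags max_tags)

-- ===== LEMMAS AND PROOFS =====

theorem dedup_cons_mem (t : String) (ts : List String) (seen : PySem.Set String)
    (h : PySem.Set.contains seen (PySem.Str.lower t) = true) :
    pvDedupLower (t :: ts) seen = pvDedupLower ts seen := by
  simp only [pvDedupLower]
  rw [if_pos h]

theorem dedup_cons_not_mem (t : String) (ts : List String) (seen : PySem.Set String)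
    (h : PySem.Set.contains seen (PySem.Str.lower t) = false) :
    pvDedupLower (t :: ts) seen =
      t :: pvDedupLower ts (PySem.Set.add seen (PySem.Str.lower t)) := by
  simp only [pvDedupLower]
  rw [if_neg (fun hc => by rw [hc] at h; exact absurd h (by decide))]

-- A's loop equals: take mt of result ++ the dedup of the cleaned remainder,
-- as long as result is still strictly below the cap.
theorem loopA_eq (ts : List String) (seen : PySem.Set String)
    (result : List String) (mt : Int) (h : (result.length : Int) < mt) :
    hashTagifyLoopA ts seen result mt =
      (result ++ pvDedupLower (ts.filterMap pvCleanTag) seen).take mt.toNat := by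
  induction ts generalizing seen result with
  | nil =>
    simp only [hashTagifyLoopA, pvDedupLower, List.filterMap_nil, List.append_nil]
    exact (List.take_of_length_le (by omega : result.length ≤ mt.toNat)).symm
  | cons t rest ih =>
    simp only [hashTagifyLoopA]
    by_cases h1 : PySem.Str.strip t = ""
    · have hc : pvCleanTag t = none := by
        simp only [pvCleanTag]
        rw [if_pos (Or.inl h1)]
      rw [if_pos h1, List.filterMap_cons, hc, ih seen result h]
    · by_cases h2 : PySem.Str.len (PySem.Str.strip t) > 100
      · have hc : pvCleanTag t = none := by
          simp only [pvCleanTag]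
          rw [if_pos (Or.inr h2)]
        rw [if_neg h1, if_pos h2, List.filterMap_cons, hc, ih seen result h]
      · by_cases h3 : (["<", ">", "script", "javascript"].any
            (fun c => PySem.Str.isIn c (PySem.Str.lower (PySem.Str.strip t)))) = true
        · have hc : pvCleanTag t = none := by
            simp only [pvCleanTag]
            rw [if_neg (not_or.mpr ⟨h1, h2⟩), if_pos h3]
          rw [if_neg h1, if_neg h2, if_pos h3, List.filterMap_cons, hc, ih seen result h]
        · rw [if_neg h1, if_neg h2, if_neg h3]
          set t' := if PySem.Str.startswith (PySem.Str.strip t) "#" then PySem.Str.strip t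
              else "#" ++ PySem.Str.strip t with ht'
          have hc : pvCleanTag t = some t' := by
            simp only [pvCleanTag]
            rw [if_neg (not_or.mpr ⟨h1, h2⟩), if_neg h3, ht']
          rw [List.filterMap_cons, hc]
          by_cases h4 : PySem.Set.contains seen (PySem.Str.lower t') = true
          · have hbrk : ¬ ((result.length : Int) ≥ mt) := by omega
            rw [dedup_cons_mem _ _ _ h4, if_pos h4]
            simp only []
            rw [if_neg hbrk]
            exact ih seen result h
          · have h4' : PySem.Set.contains seen (PySem.Str.lower t') = false := by
              simpa using h4
            rw [dedup_cons_not_mem _ _ _ h4', if_neg h4]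
            simp only []
            by_cases h5 : (((result ++ [t']).length : Int) ≥ mt)
            · have hmt : (result ++ [t']).length = mt.toNat := by
                simp only [List.length_append, List.length_cons, List.length_nil] at *
                omega
              rw [if_pos h5]
              rw [show result ++ t' :: pvDedupLower (rest.filterMap pvCleanTag)
                    (PySem.Set.add seen (PySem.Str.lower t')) =
                  (result ++ [t']) ++ pvDedupLower (rest.filterMap pvCleanTag)
                    (PySem.Set.add seen (PySem.Str.lower t')) by simp]
              exact (List.take_left' hmt).symm
            · have hlt : (((result ++ [t']).length : Int)) < mt := by omega
              rw [if_neg h5, ih _ _ hlt]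
              simp

-- ===== VERDICT (by name: the statement is the Claim_ definition above) =====
theorem hash_tagify_py_spec : Claim_equal_hash_tagify_py := by
  intro tags max_tags _
  unfold Spec_hash_tagify_py hash_tagify_py hash_tagify_py_alt
  set mt := if max_tags ≤ 0 ∨ max_tags > 100 then 10 else max_tags with hmt
  have hpos : 1 ≤ mt := by
    rw [hmt]; split_ifs with h <;> omega
  rw [loopA_eq tags PySem.Set.empty [] mt (by simp; omega)]
  rw [PySem.List.slice_to _ (by omega)]
  simp
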